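-- pv_equiv track=rewrite | github.com/MIT-LCP/wfdb-python | wfdb/readwrite/records.py | orderedsetlist
-- ===== SOURCE A (Python) =====
-- def orderedsetlist(fulllist):
--     uniquelist = []
--     original_inds = {}
--
--     for i in range(0, len(fulllist)):
--         item = fulllist[i]
--         # new item
--         if item not in uniquelist:
--             uniquelist.append(item)
--             original_inds[item] = [i]
--         # previously seen item
--         else:
--             original_inds[item].append(i)
--     return uniquelist, original_inds
-- ===== SOURCE B (Python) =====
-- def orderedsetlist(fulllist):
--     uniquelist = [x for k, x in enumerate(fulllist) if x not in fulllist[:k]]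
--     original_inds = {v: [i for i, x in enumerate(fulllist) if x == v]
--                      for v in uniquelist}
--     return uniquelist, original_inds
-- ===== Notes on version B (the rewrite author's own statement) =====
-- stated objective: simpler
-- what changed: A makes one stateful pass maintaining uniquelist and the dict together behind an if/else membership branch; B has no accumulators at all: it first selects the first occurrences declaratively (x not in the prefix before it), then builds each value's full index list by a separate scan per unique value.
import Mathlib
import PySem

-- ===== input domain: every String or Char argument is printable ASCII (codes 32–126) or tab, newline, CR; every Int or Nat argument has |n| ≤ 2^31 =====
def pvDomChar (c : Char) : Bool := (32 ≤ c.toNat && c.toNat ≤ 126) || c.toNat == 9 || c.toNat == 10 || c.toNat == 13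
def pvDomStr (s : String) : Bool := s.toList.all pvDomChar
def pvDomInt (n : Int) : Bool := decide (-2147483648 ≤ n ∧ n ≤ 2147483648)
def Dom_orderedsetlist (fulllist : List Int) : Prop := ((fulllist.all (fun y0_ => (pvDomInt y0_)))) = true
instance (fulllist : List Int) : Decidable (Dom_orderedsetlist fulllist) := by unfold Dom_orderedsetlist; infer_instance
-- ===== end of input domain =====

-- B drops A's stateful loop (uniquelist + dict behind an if/else) for a declarative two-stage
-- build: first occurrences by a prefix test, then one index-gathering scan per unique value (simpler).

-- ===== PORT A =====
-- for i in range(len(fulllist)): item = fulllist[i]; if item not in uniquelist: append + new dict entry; else: append index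
def orderedsetlist (fulllist : List Int) : List Int × (List (Int × List Int)) :=
  let res := (PySem.List.enumerate fulllist).foldl
    (fun (st : List Int × PySem.Dict Int (List Int)) (p : Int × Int) =>
      if p.2 ∉ st.1 then
        (st.1 ++ [p.2], st.2.insert p.2 [p.1])
      else
        (st.1, st.2.modify p.2 [] (fun v => v ++ [p.1])))
    ([], PySem.Dict.empty)
  (res.1, res.2.items)

-- ===== PORT B =====
-- uniquelist = [x for k,x in enumerate(l) if x not in l[:k]];
-- original_inds = {v: [i for i,x in enumerate(l) if x == v] for v in uniquelist}
-- (the comprehension's keys are the distinct values of uniquelist, so the dict is this assoc list)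
def orderedsetlist_alt (fulllist : List Int) : List Int × (List (Int × List Int)) :=
  let ul := ((PySem.List.enumerate fulllist).filter
      (fun p => decide (p.2 ∉ PySem.List.slice fulllist (some 0) (some p.1)))).map (·.2)
  let d := ul.map (fun v =>
      (v, ((PySem.List.enumerate fulllist).filter (fun p => p.2 == v)).map (·.1)))
  (ul, d)

-- ===== PRECONDITION & SPEC =====
def Spec_orderedsetlist (fulllist : List Int) (out : List Int × (List (Int × List Int))) : Prop := out = orderedsetlist_alt fulllist
instance (fulllist : List Int) (out : List Int × (List (Int × List Int))) : Decidable (Spec_orderedsetlist fulllist out) := by unfold Spec_orderedsetlist; infer_instance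

-- ===== CLAIM (what is proved, stated in full; the proofs are below) =====
def Claim_equal_orderedsetlist : Prop := ∀ (fulllist : List Int), Dom_orderedsetlist fulllist → Spec_orderedsetlist fulllist (orderedsetlist fulllist)

-- ===== LEMMAS AND PROOFS =====

-- the dict built by the pure index-collecting fold (proof-internal name)
def pvD (fulllist : List Int) : PySem.Dict Int (List Int) :=
  (PySem.List.enumerate fulllist).foldl
    (fun (d : PySem.Dict Int (List Int)) (p : Int × Int) =>
      d.modify p.2 [] (fun v => v ++ [p.1]))
    PySem.Dict.empty

-- Loop invariant: A's fold state stays (keys of the index dict, the index dict).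
theorem orderedsetlist_inv (l : List (Int × Int)) :
    ∀ (ul : List Int) (d : PySem.Dict Int (List Int)), ul = d.keys →
    l.foldl
      (fun (st : List Int × PySem.Dict Int (List Int)) (p : Int × Int) =>
        if p.2 ∉ st.1 then (st.1 ++ [p.2], st.2.insert p.2 [p.1])
        else (st.1, st.2.modify p.2 [] (fun v => v ++ [p.1])))
      (ul, d)
    = ((l.foldl (fun (d : PySem.Dict Int (List Int)) (p : Int × Int) =>
          d.modify p.2 [] (fun v => v ++ [p.1])) d).keys,
       l.foldl (fun (d : PySem.Dict Int (List Int)) (p : Int × Int) =>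
          d.modify p.2 [] (fun v => v ++ [p.1])) d) := by
  induction l with
  | nil => intro ul d h; simp [List.foldl, h]
  | cons p t ih =>
    intro ul d h
    simp only [List.foldl]
    by_cases hmem : p.2 ∈ ul
    · have hcon : d.contains p.2 = true := by
        rw [PySem.Dict.contains_iff_mem_keys]; rw [h] at hmem; exact hmem
      rw [if_neg (by simp [hmem])]
      refine ih ul _ ?_
      rw [h, PySem.Dict.modify, PySem.Dict.keys_insert_of_contains _ _ hcon]
    · have hcon : d.contains p.2 = false := by
        rw [← Bool.not_eq_true, PySem.Dict.contains_iff_mem_keys]; rw [h] at hmem; exact hmem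
      rw [if_pos hmem]
      have hd : d.insert p.2 [p.1] = d.modify p.2 [] (fun v => v ++ [p.1]) := by
        rw [PySem.Dict.modify, PySem.Dict.getD_of_not_contains _ _ hcon]
        simp
      rw [hd]
      refine ih _ _ ?_
      rw [h, PySem.Dict.modify, PySem.Dict.keys_insert_of_not_contains _ _ hcon]

-- B's first stage computes exactly set(l) in first-appearance order.
theorem ul_eq_ofList (fulllist : List Int) :
    ((PySem.List.enumerate fulllist).filter
      (fun p => decide (p.2 ∉ PySem.List.slice fulllist (some 0) (some p.1)))).map (·.2)
    = PySem.Set.ofList fulllist := by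
  induction fulllist using List.reverseRecOn with
  | nil => simp [PySem.List.enumerate, PySem.Set.ofList]
  | append_singleton l a ih =>
    rw [PySem.List.enumerate_append]
    rw [List.filter_append, List.map_append]
    have h1 : (PySem.List.enumerate l).filter
        (fun p => decide (p.2 ∉ PySem.List.slice (l ++ [a]) (some 0) (some p.1)))
      = (PySem.List.enumerate l).filter
        (fun p => decide (p.2 ∉ PySem.List.slice l (some 0) (some p.1))) := by
      apply List.filter_congr
      intro p hp
      obtain ⟨k, hk, rfl⟩ := (PySem.List.mem_enumerate_iff _ _ _).1 hp
      simp only [zero_add]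
      rw [PySem.List.slice_zero_start, PySem.List.slice_zero_start,
          PySem.List.slice_to_natCast, PySem.List.slice_to_natCast,
          List.take_append_of_le_length (le_of_lt hk)]
    rw [h1, ih, PySem.Set.ofList_append_singleton, PySem.Set.add_eq_ite]
    have h2 : PySem.List.enumerate [a] (0 + (l.length : Int)) = [((l.length : Int), a)] := by
      simp [PySem.List.enumerate]
    rw [h2]
    by_cases hm : a ∈ l
    · rw [if_pos (by rw [PySem.Set.mem_ofList]; exact hm)]
      simp [hm]
    · rw [if_neg (by rw [PySem.Set.mem_ofList]; exact hm)]
      simp [hm]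

-- keys of the index dict = set(l) in order
theorem keys_pvD (fulllist : List Int) : (pvD fulllist).keys = PySem.Set.ofList fulllist := by
  unfold pvD
  rw [PySem.Dict.keys_foldl_modify_key]
  rw [PySem.Dict.keys_empty, PySem.Set.update_nil_left, PySem.List.map_snd_enumerate]

-- each key's stored value = the indices where it occurs
theorem getD_pvD (fulllist : List Int) (v : Int) :
    (pvD fulllist).getD v []
    = ((PySem.List.enumerate fulllist).filter (fun p => p.2 == v)).map (·.1) := by
  unfold pvD
  have hfold : (PySem.List.enumerate fulllist).foldl
      (fun (d : PySem.Dict Int (List Int)) (p : Int × Int) =>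
        d.modify p.2 [] (fun w => w ++ [p.1]))
      PySem.Dict.empty
    = ((PySem.List.enumerate fulllist).map Prod.swap).foldl
      (fun (d : PySem.Dict Int (List Int)) (q : Int × Int) =>
        d.modify q.1 [] (fun w => w ++ [q.2]))
      PySem.Dict.empty := by
    rw [List.foldl_map]
    rfl
  rw [hfold, PySem.Dict.getD_foldl_modify_append]
  rw [PySem.Dict.getD_empty, List.filter_map, List.map_map]
  simp only [Function.comp_def, Prod.fst_swap, Prod.snd_swap, List.nil_append]

-- ===== VERDICT (by name: the statement is the Claim_ definition above) =====
theorem orderedsetlist_spec : Claim_equal_orderedsetlist := by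
  intro fulllist _
  unfold Spec_orderedsetlist orderedsetlist orderedsetlist_alt
  rw [orderedsetlist_inv _ [] PySem.Dict.empty (by simp [PySem.Dict.keys_empty])]
  rw [ul_eq_ofList]
  have hnd : (pvD fulllist).keys.Nodup := by
    unfold pvD
    exact PySem.Dict.nodup_keys_foldl_modify_key _ _ _ _ _ (by simp [PySem.Dict.keys_empty])
  have hitems := PySem.Dict.items_eq_map_keys (pvD fulllist) hnd []
  show ((pvD fulllist).keys, (pvD fulllist).items) = _
  rw [hitems, keys_pvD]
  congr 1
  apply List.map_congr_left
  intro v _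
  rw [getD_pvD]
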